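-- pv_equiv track=rewrite | github.com/kierachell/practice | python/cracking/hard.py | shortest_superseq
-- ===== SOURCE A (Python) =====
-- def size_subarray(arr, subarray):
--     collected = []
--     size = 0
--     for num in arr:
--         size += 1
--         if num in subarray:
--             collected.append(num)
--         if sorted(collected) == sorted(subarray):
--             break
--     return size
--
-- def shortest_superseq(arr, subarray):
--     starts = {}
--     size = len(arr)
--     idx = 0
--     while idx < size:
--         if arr[idx] in subarray:
--             subsize = size_subarray(arr[idx:], subarray)
--             starts.update({idx: subsize})
--         idx += 1
--     start = 0
--     max_size = 0
--     for idx, size in starts.items():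
--         if size > max_size:
--             start = idx
--             max_size = size
--     return (start, start+max_size)
-- ===== SOURCE B (Python) =====
-- def shortest_superseq(arr, subarray):
--     n = len(arr)
--     m = len(subarray)
--     # target multiset of the subarray
--     target = {}
--     for v in subarray:
--         target[v] = target.get(v, 0) + 1
--     # positions/values of the elements of arr that belong to the subarray
--     members = [(j, x) for j, x in enumerate(arr) if x in target]
--     k = len(members)
--     # sliding window of m consecutive members, counted incrementally
--     cnt = {}
--     for _, x in members[:m]:
--         cnt[x] = cnt.get(x, 0) + 1
--     best_start = 0
--     best_size = 0
--     for t, (p, x) in enumerate(members):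
--         if t + m <= k and all(cnt.get(v, 0) == target[v] for v in target):
--             size = members[t + m - 1][0] - p + 1
--         else:
--             size = n - p
--         if size > best_size:
--             best_start, best_size = p, size
--         cnt[x] -= 1
--         if t + m < k:
--             y = members[t + m][1]
--             cnt[y] = cnt.get(y, 0) + 1
--     return (best_start, best_start + best_size)
-- ===== Notes on version B (the rewrite author's own statement) =====
-- stated objective: faster
-- what changed: A rescans forward from every candidate start, re-sorting its collected list after each element; B extracts the member positions once, then slides a single fixed-size window of len(subarray) consecutive members across them, maintaining the window's multiset counter incrementally (O(1) update per step) and reading each window's end position directly, so the per-start rescan disappears entirely.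
import Mathlib
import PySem

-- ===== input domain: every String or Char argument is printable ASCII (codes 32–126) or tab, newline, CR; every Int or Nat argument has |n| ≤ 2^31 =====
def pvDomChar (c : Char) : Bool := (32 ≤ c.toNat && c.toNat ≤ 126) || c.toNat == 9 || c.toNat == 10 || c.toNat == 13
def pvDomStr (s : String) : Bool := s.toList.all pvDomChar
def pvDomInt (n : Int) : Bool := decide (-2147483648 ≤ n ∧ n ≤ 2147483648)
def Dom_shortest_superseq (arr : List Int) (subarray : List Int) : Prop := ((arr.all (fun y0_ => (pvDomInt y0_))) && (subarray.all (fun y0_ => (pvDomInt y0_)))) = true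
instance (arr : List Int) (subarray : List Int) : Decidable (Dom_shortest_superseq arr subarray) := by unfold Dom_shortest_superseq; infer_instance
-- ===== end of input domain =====

-- B replaces A's fresh scan (with per-element re-sorting) from every candidate start by ONE
-- sliding window of len(subarray) consecutive members whose multiset counter is updated
-- incrementally (objective: faster).

-- ===== PORT A =====
-- sorted(xs) (no key)
def pvSortedI (xs : List Int) : List Int := PySem.List.sorted xs (fun x => x) false

-- the for-loop of size_subarray with its break, state = (collected, size)
def pvSizeSub (sub : List Int) : List Int → List Int → Int → Int
  | [], _collected, size => size
  | num :: rest, collected, size =>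
    let collected' := if sub.contains num then collected ++ [num] else collected
    if pvSortedI collected' = pvSortedI sub then size + 1
    else pvSizeSub sub rest collected' (size + 1)

def size_subarray (arr : List Int) (subarray : List Int) : Int :=
  pvSizeSub subarray arr [] 0

def shortest_superseq (arr : List Int) (subarray : List Int) : List Int :=
  -- while idx < size: … (the index loop over arr, rendered via enumerate)
  let starts : PySem.Dict Int Int :=
    (PySem.List.enumerate arr).foldl
      (fun d p =>
        if subarray.contains p.2 then
          d.insert p.1 (size_subarray (PySem.List.slice arr (some p.1) none) subarray)
        else d)
      PySem.Dict.empty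
  -- for idx, size in starts.items(): pick max
  let best := starts.items.foldl
      (fun acc kv => if kv.2 > acc.2 then (kv.1, kv.2) else acc) ((0 : Int), (0 : Int))
  [best.1, best.1 + best.2]

-- ===== PORT B =====
-- target = {}; for v in subarray: target[v] = target.get(v, 0) + 1
def pvTarget (sub : List Int) : PySem.Dict Int Int :=
  sub.foldl (fun d v => d.insert v (d.getD v 0 + 1)) PySem.Dict.empty

-- the main sliding-window loop of Source B ('for t, (p, x) in enumerate(members)');
-- 'cnt[x] -= 1' is rendered by 'modify' (exact: x is always a present key when it runs)
def pvLoop (n : Int) (m k : Nat) (target : PySem.Dict Int Int) (members : List (Int × Int)) :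
    List (Int × Int) → Nat → PySem.Dict Int Int → Int × Int → Int × Int
  | [], _, _, best => best
  | (p, x) :: rest, t, cnt, best =>
    let size : Int :=
      if t + m ≤ k ∧ target.keys.all (fun v => cnt.getD v 0 == target.getD v 0)
      then (members.getD (t + m - 1) (0, 0)).1 - p + 1   -- members[t+m-1][0] (guard keeps it in range)
      else n - p
    let best' := if size > best.2 then (p, size) else best
    let cnt' := cnt.modify x 0 (· - 1)
    let cnt'' := if t + m < k then
        let y := (members.getD (t + m) (0, 0)).2          -- members[t+m][1] (in range: t+m < k)
        cnt'.insert y (cnt'.getD y 0 + 1)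
      else cnt'
    pvLoop n m k target members rest (t + 1) cnt'' best'

def shortest_superseq_alt (arr : List Int) (subarray : List Int) : List Int :=
  let n : Int := arr.length
  let m := subarray.length
  let target := pvTarget subarray
  let members := (PySem.List.enumerate arr).filter (fun q => target.contains q.2)
  let k := members.length
  let cnt0 := (PySem.List.slice members none (some (m : Int))).foldl
      (fun d q => d.insert q.2 (d.getD q.2 0 + 1)) PySem.Dict.empty
  let best := pvLoop n m k target members members 0 cnt0 ((0 : Int), (0 : Int))
  [best.1, best.1 + best.2]

-- ===== PRECONDITION & SPEC =====
def Spec_shortest_superseq (arr : List Int) (subarray : List Int) (out : List Int) : Prop := out = shortest_superseq_alt arr subarray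
instance (arr : List Int) (subarray : List Int) (out : List Int) : Decidable (Spec_shortest_superseq arr subarray out) := by unfold Spec_shortest_superseq; infer_instance

-- ===== CLAIM (what is proved, stated in full; the proofs are below) =====
def Claim_equal_shortest_superseq : Prop := ∀ (arr : List Int) (subarray : List Int), Dom_shortest_superseq arr subarray → Spec_shortest_superseq arr subarray (shortest_superseq arr subarray)

-- ===== LEMMAS AND PROOFS =====

-- the member list of arr (pairs (absolute index, value)), enumerate start j
def pvMemb (sub arr : List Int) (j : Int) : List (Int × Int) :=
  (PySem.List.enumerate arr j).filter (fun q => sub.contains q.2)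

-- sorted(a) == sorted(b) is multiset equality
theorem pv_sortedI_eq_iff (a b : List Int) : pvSortedI a = pvSortedI b ↔ a.Perm b := by
  unfold pvSortedI
  exact PySem.List.sorted_id_eq_sorted_id_iff_perm a b

-- once the collected list is as long as sub and not a permutation of it, A never breaks
theorem pv_sizeSub_stuck (sub : List Int) :
    ∀ (L c : List Int) (s : Int), sub.length ≤ c.length → ¬ c.Perm sub →
      pvSizeSub sub L c s = s + L.length := by
  intro L
  induction L with
  | nil => intro c s _ _; simp [pvSizeSub]
  | cons x rest ih =>
    intro c s hlen hperm
    simp only [pvSizeSub]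
    by_cases hx : sub.contains x
    · simp only [hx, if_true]
      have hperm' : ¬ (c ++ [x]).Perm sub := by
        intro h
        have := h.length_eq
        simp at this
        omega
      rw [if_neg (by rw [pv_sortedI_eq_iff]; exact hperm'), ih _ _ (by simp; omega) hperm']
      simp only [List.length_cons]; push_cast; omega
    · simp only [hx, Bool.false_eq_true, if_false]
      rw [if_neg (by rw [pv_sortedI_eq_iff]; exact hperm), ih _ _ hlen hperm]
      simp only [List.length_cons]; push_cast; omega

-- A's scan from a start, characterised by the member list of its suffix:
-- it breaks exactly when the (need)-th member completes a permutation of sub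
theorem pv_scan (sub : List Int) :
    ∀ (L c : List Int) (s j : Int), c.length < sub.length → (∀ y ∈ c, y ∈ sub) →
      pvSizeSub sub L c s =
        (if sub.length - c.length ≤ (pvMemb sub L j).length ∧
            (c ++ ((pvMemb sub L j).map Prod.snd).take (sub.length - c.length)).Perm sub
         then s + ((pvMemb sub L j).getD (sub.length - c.length - 1) (0, 0)).1 - j + 1
         else s + L.length) := by
  intro L
  induction L with
  | nil =>
    intro c s j hc _
    rw [if_neg]
    · simp [pvSizeSub]
    · intro h
      have := h.1
      simp [pvMemb, PySem.List.enumerate_nil] at this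
      omega
  | cons x rest ih =>
    intro c s j hc hmem
    have hF : pvMemb sub (x :: rest) j =
        (if sub.contains x then [(j, x)] else []) ++ pvMemb sub rest (j + 1) := by
      simp only [pvMemb, PySem.List.enumerate_cons, List.filter_cons]
      split_ifs <;> simp_all
    simp only [pvSizeSub]
    by_cases hx : sub.contains x
    · simp only [hx, if_true] at hF ⊢
      simp only [List.singleton_append] at hF
      have hmem' : ∀ y ∈ c ++ [x], y ∈ sub := by
        intro y hy
        rcases List.mem_append.1 hy with h | h
        · exact hmem y h
        · simp at h; subst h; exact List.mem_of_elem_eq_true hx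
      by_cases hperm : (c ++ [x]).Perm sub
      · -- break now
        have hneed : sub.length - c.length = 1 := by
          have := hperm.length_eq; simp at this; omega
        rw [if_pos (by rw [pv_sortedI_eq_iff]; exact hperm)]
        rw [if_pos]
        · rw [hF]
          simp [hneed]
        · constructor
          · rw [hF, hneed]; simp
          · rw [hF, hneed]
            simpa using hperm
      · rw [if_neg (by rw [pv_sortedI_eq_iff]; exact hperm)]
        by_cases hone : sub.length - c.length = 1
        · -- window full but not a permutation: never breaks
          rw [pv_sizeSub_stuck sub rest (c ++ [x]) (s + 1) (by simp; omega) hperm]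
          rw [if_neg]
          · simp only [List.length_cons]; push_cast; omega
          · rintro ⟨-, hp⟩
            rw [hF, hone] at hp
            simp at hp
            exact hperm hp
        · -- window not yet full
          have hc' : (c ++ [x]).length < sub.length := by simp; omega
          rw [ih (c ++ [x]) (s + 1) (j + 1) hc' hmem']
          have hiff : (sub.length - (c ++ [x]).length ≤ (pvMemb sub rest (j + 1)).length ∧
              ((c ++ [x]) ++ ((pvMemb sub rest (j + 1)).map Prod.snd).take
                (sub.length - (c ++ [x]).length)).Perm sub) ↔
              (sub.length - c.length ≤ (pvMemb sub (x :: rest) j).length ∧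
              (c ++ ((pvMemb sub (x :: rest) j).map Prod.snd).take
                (sub.length - c.length)).Perm sub) := by
            rw [hF]
            have h1 : sub.length - c.length = (sub.length - (c ++ [x]).length) + 1 := by
              simp; omega
            constructor
            · rintro ⟨ha, hb⟩
              refine ⟨by simp; omega, ?_⟩
              rw [h1]
              simpa [List.append_assoc] using hb
            · rintro ⟨ha, hb⟩
              refine ⟨by simp at ha ⊢; omega, ?_⟩
              rw [h1] at hb
              simpa [List.append_assoc] using hb
          rw [if_congr hiff rfl rfl]
          split_ifs with hcond
          · rw [hF]
            have h2 : sub.length - c.length - 1 = (sub.length - (c ++ [x]).length - 1) + 1 := by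
              simp; omega
            rw [h2, List.getD_cons_succ]
            simp; omega
          · simp only [List.length_cons]; push_cast; omega
    · simp only [hx, Bool.false_eq_true, if_false] at hF ⊢
      simp only [List.nil_append] at hF
      have hperm : ¬ c.Perm sub := by
        intro h; have := h.length_eq; omega
      rw [if_neg (by rw [pv_sortedI_eq_iff]; exact hperm)]
      rw [ih c (s + 1) (j + 1) hc hmem, hF]
      split_ifs with hcond
      · simp; omega
      · simp only [List.length_cons]; push_cast; omega

-- dropping the member list at position t = the member list of the suffix at its index
theorem pv_bridge (sub : List Int) :
    ∀ (arr : List Int) (j : Int) (t : Nat) (p x : Int) (rest : List (Int × Int)),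
      (pvMemb sub arr j).drop t = (p, x) :: rest →
      0 ≤ p - j ∧ pvMemb sub (arr.drop (p - j).toNat) p = (p, x) :: rest := by
  intro arr
  induction arr with
  | nil => intro j t p x rest h; simp [pvMemb, PySem.List.enumerate_nil] at h
  | cons a as ih =>
    intro j t p x rest h
    have hF : pvMemb sub (a :: as) j =
        (if sub.contains a then [(j, a)] else []) ++ pvMemb sub as (j + 1) := by
      simp only [pvMemb, PySem.List.enumerate_cons, List.filter_cons]
      split_ifs <;> simp_all
    by_cases ha : sub.contains a
    · simp only [ha, if_true, List.singleton_append] at hF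
      rw [hF] at h
      cases t with
      | zero =>
        rw [List.drop_zero] at h
        simp only [List.cons.injEq, Prod.mk.injEq] at h
        obtain ⟨⟨h1, rfl⟩, rfl⟩ := h
        refine ⟨by omega, ?_⟩
        have h0 : (p - j).toNat = 0 := by omega
        rw [h0, List.drop_zero, ← h1]
        exact hF
      | succ t =>
        rw [List.drop_succ_cons] at h
        obtain ⟨h0, hres⟩ := ih (j + 1) t p x rest h
        refine ⟨by omega, ?_⟩
        have h1 : (p - j).toNat = (p - (j + 1)).toNat + 1 := by omega
        rw [h1, List.drop_succ_cons]
        exact hres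
    · simp only [ha, Bool.false_eq_true, if_false, List.nil_append] at hF
      rw [hF] at h
      obtain ⟨h0, hres⟩ := ih (j + 1) t p x rest h
      refine ⟨by omega, ?_⟩
      have h1 : (p - j).toNat = (p - (j + 1)).toNat + 1 := by omega
      rw [h1, List.drop_succ_cons]
      exact hres

-- the counter check over target's keys is multiset equality with sub
theorem pv_guard (sub W : List Int) (cnt : PySem.Dict Int Int)
    (hW : ∀ y ∈ W, y ∈ sub)
    (hinv : ∀ v : Int, cnt.getD v 0 = (W.count v : Int)) :
    ((pvTarget sub).keys.all (fun v => cnt.getD v 0 == (pvTarget sub).getD v 0) = true)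
      ↔ W.Perm sub := by
  have htarget : pvTarget sub = PySem.Dict.counter sub :=
    PySem.Dict.foldl_insert_getD_add_one_eq_counter sub
  rw [htarget, List.all_eq_true]
  constructor
  · intro h
    rw [List.perm_iff_count]
    intro v
    by_cases hv : v ∈ sub
    · have hk : v ∈ (PySem.Dict.counter sub).keys := by
        rw [PySem.Dict.keys_counter]
        exact (PySem.Set.mem_ofList sub v).2 hv
      have hv2 := h v hk
      rw [beq_iff_eq, hinv, PySem.Dict.getD_counter] at hv2
      exact_mod_cast hv2
    · rw [List.count_eq_zero_of_not_mem hv,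
        List.count_eq_zero_of_not_mem (fun hw => hv (hW v hw))]
  · intro h v _
    rw [beq_iff_eq, hinv, PySem.Dict.getD_counter]
    exact_mod_cast h.count_eq v

-- the sliding-window loop, against a fold of A's per-start sizes
theorem pv_loop_eq (arr sub : List Int) :
    ∀ (suffix : List (Int × Int)) (t : Nat) (cnt : PySem.Dict Int Int) (best : Int × Int),
      suffix = (pvMemb sub arr 0).drop t →
      (∀ v : Int, cnt.getD v 0 =
        (((((pvMemb sub arr 0).map Prod.snd).drop t).take sub.length).count v : Int)) →
      pvLoop (arr.length : Int) sub.length (pvMemb sub arr 0).length (pvTarget sub)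
          (pvMemb sub arr 0) suffix t cnt best
        = suffix.foldl
            (fun acc q =>
              if size_subarray (PySem.List.slice arr (some q.1) none) sub > acc.2
              then (q.1, size_subarray (PySem.List.slice arr (some q.1) none) sub)
              else acc) best := by
  intro suffix
  induction suffix with
  | nil => intro t cnt best _ _; simp [pvLoop]
  | cons q rest ih =>
    obtain ⟨p, x⟩ := q
    intro t cnt best hsuf hinv
    have hsuf' := hsuf.symm
    set M := pvMemb sub arr 0 with hMdef
    set m := sub.length with hmdef
    set k := M.length with hkdef
    set vals := M.map Prod.snd with hvalsdef
    -- t < k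
    have ht : t < k := by
      by_contra hle
      rw [List.drop_eq_nil_of_le (by omega)] at hsuf'
      exact List.cons_ne_nil _ _ hsuf'.symm
    -- M[t]? = some (p, x)
    have hMt : M[t]? = some (p, x) := by
      have h1 : (M.drop t)[0]? = M[t + 0]? := List.getElem?_drop
      rw [Nat.add_zero] at h1
      rw [← h1, hsuf']
      rfl

    -- (p, x) ∈ M
    have hpxM : (p, x) ∈ M := List.mem_of_getElem? hMt
    have hpxE : (p, x) ∈ PySem.List.enumerate arr 0 ∧ sub.contains x = true := by
      have := hpxM
      rw [hMdef, pvMemb, List.mem_filter] at this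
      exact this
    have hxsub : x ∈ sub := List.mem_of_elem_eq_true hpxE.2
    have hm1 : 1 ≤ m := by
      rw [hmdef]
      exact List.length_pos_of_mem hxsub
    obtain ⟨k0, hk0, hpk0⟩ := (PySem.List.mem_enumerate_iff arr 0 (p, x)).1 hpxE.1
    have hp : p = (k0 : Int) := by
      have := congrArg Prod.fst hpk0
      simpa using this
    -- bridge: the member list of the suffix at p
    obtain ⟨hp0, hB⟩ := pv_bridge sub arr 0 t p x rest hsuf.symm
    have hptn : (p - 0).toNat = p.toNat := by omega
    rw [hptn] at hB
    -- A's size at this start, via pv_scan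
    have hslice : PySem.List.slice arr (some p) none = arr.drop p.toNat := by
      rw [PySem.List.slice_from arr (by omega)]
    have hlen : ((arr.drop p.toNat).length : Int) = (arr.length : Int) - p := by
      rw [List.length_drop]
      omega
    have hvalsub : ∀ y ∈ vals, y ∈ sub := by
      intro y hy
      rw [hvalsdef, List.mem_map] at hy
      obtain ⟨q, hqM, rfl⟩ := hy
      rw [hMdef, pvMemb, List.mem_filter] at hqM
      exact List.mem_of_elem_eq_true hqM.2
    have hWmem : ∀ y ∈ (vals.drop t).take sub.length, y ∈ sub := fun y hy =>
      hvalsub y (List.mem_of_mem_drop (List.mem_of_mem_take hy))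
    have hmapdrop : (M.drop t).map Prod.snd = vals.drop t := by
      rw [hvalsdef, List.map_drop]
    have hgetD : (M.drop t).getD (m - 1) (0, 0) = M.getD (t + m - 1) (0, 0) := by
      rw [List.getD_eq_getElem?_getD, List.getD_eq_getElem?_getD, List.getElem?_drop]
      have h3 : t + (m - 1) = t + m - 1 := by omega
      rw [h3]
    have hlen2 : (M.drop t).length = k - t := by
      rw [List.length_drop]
    -- A's per-start size via pv_scan and the bridge
    have hAsize : size_subarray (PySem.List.slice arr (some p) none) sub =
        (if m ≤ (M.drop t).length ∧ (((M.drop t).map Prod.snd).take m).Perm sub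
         then ((M.drop t).getD (m - 1) (0, 0)).1 - p + 1
         else (arr.length : Int) - p) := by
      rw [hslice]
      unfold size_subarray
      rw [pv_scan sub (arr.drop p.toNat) [] 0 p (by simp only [List.length_nil]; exact hm1) (by simp)]
      rw [hB, hsuf']
      simp only [List.length_nil, Nat.sub_zero, List.nil_append, zero_add]
      rw [hlen]
    -- B's guard equals A's permutation test
    have hguard := pv_guard sub ((vals.drop t).take sub.length) cnt hWmem hinv
    have hcond : (t + m ≤ k ∧
        ((pvTarget sub).keys.all (fun v => cnt.getD v 0 == (pvTarget sub).getD v 0) = true))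
        ↔ (m ≤ (M.drop t).length ∧ (((M.drop t).map Prod.snd).take m).Perm sub) := by
      rw [hmapdrop, hlen2]
      constructor
      · rintro ⟨h1, h2⟩
        exact ⟨by omega, hguard.1 h2⟩
      · rintro ⟨h1, h2⟩
        exact ⟨by omega, hguard.2 h2⟩
    have hsizeEq : (if t + m ≤ k ∧
          ((pvTarget sub).keys.all (fun v => cnt.getD v 0 == (pvTarget sub).getD v 0) = true)
        then (M.getD (t + m - 1) (0, 0)).1 - p + 1
        else (arr.length : Int) - p)
        = size_subarray (PySem.List.slice arr (some p) none) sub := by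
      rw [hAsize, hgetD]
      exact if_congr hcond rfl rfl
    -- vals at t
    have htv : t < vals.length := by
      rw [hvalsdef, List.length_map]
      exact ht
    have hvt : vals.drop t = x :: vals.drop (t + 1) := by
      rw [List.drop_eq_getElem_cons htv]
      have h4 : vals[t]? = some x := by
        rw [hvalsdef, List.getElem?_map, hMt]
        rfl
      have h5 : vals[t]? = some vals[t] := List.getElem?_eq_getElem htv
      rw [h4] at h5
      injection h5 with h5
      rw [h5]
    have hm' : m = (m - 1) + 1 := by omega
    have hWt : (vals.drop t).take m = x :: (vals.drop (t + 1)).take (m - 1) := by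
      rw [hvt]
      conv_lhs => rw [hm']
      rw [List.take_succ_cons]
    -- counter after 'cnt[x] -= 1'
    have hmod : ∀ v : Int, (cnt.modify x 0 (· - 1)).getD v 0 =
        (((vals.drop (t + 1)).take (m - 1)).count v : Int) := by
      intro v
      rw [PySem.Dict.getD_modify]
      by_cases hvx' : v = x
      · subst hvx'
        have hvx := hinv v
        rw [hWt] at hvx
        rw [if_pos rfl, hvx]
        simp
      · have hv0 := hinv v
        rw [hWt] at hv0
        rw [if_neg hvx', hv0]
        simp [List.count_cons]
        exact fun h => hvx' h.symm
    -- the new window's counter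
    by_cases hk2 : t + m < k
    · -- a new member enters the window
      have hty : t + m < M.length := hk2
      set y := (M.getD (t + m) (0, 0)).2 with hydef
      have hvy : (vals.drop (t + 1))[m - 1]? = some y := by
        rw [List.getElem?_drop]
        have h6 : t + 1 + (m - 1) = t + m := by omega
        rw [h6, hvalsdef, List.getElem?_map]
        have h7 : M[t + m]? = some M[t + m] := List.getElem?_eq_getElem hty
        rw [h7, hydef, List.getD_eq_getElem?_getD, h7]
        rfl
      have hWnext : (vals.drop (t + 1)).take m = (vals.drop (t + 1)).take (m - 1) ++ [y] := by
        conv_lhs => rw [hm']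
        rw [List.take_add_one, hvy]
        rfl
      have hinv' : ∀ v : Int,
          ((cnt.modify x 0 (· - 1)).insert y ((cnt.modify x 0 (· - 1)).getD y 0 + 1)).getD v 0 =
          ((((vals.drop (t + 1)).take m).count v : Nat) : Int) := by
        intro v
        rw [PySem.Dict.getD_insert, hWnext]
        by_cases hvy' : v = y
        · subst hvy'
          rw [if_pos rfl, hmod y]
          simp [List.count_append]
        · rw [if_neg hvy', hmod v]
          simp [List.count_append, List.count_eq_zero, hvy']
      have hrest : rest = M.drop (t + 1) := by
        have : M.drop (t + 1) = (M.drop t).drop 1 := by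
          rw [List.drop_drop]
        rw [this, hsuf']
        rfl
      have hstep := ih (t + 1)
        ((cnt.modify x 0 (· - 1)).insert y ((cnt.modify x 0 (· - 1)).getD y 0 + 1))
        (if (if t + m ≤ k ∧
              ((pvTarget sub).keys.all (fun v => cnt.getD v 0 == (pvTarget sub).getD v 0) = true)
            then (M.getD (t + m - 1) (0, 0)).1 - p + 1
            else (arr.length : Int) - p) > best.2
          then (p, (if t + m ≤ k ∧
              ((pvTarget sub).keys.all (fun v => cnt.getD v 0 == (pvTarget sub).getD v 0) = true)
            then (M.getD (t + m - 1) (0, 0)).1 - p + 1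
            else (arr.length : Int) - p))
          else best)
        hrest hinv'
      simp only [pvLoop, if_pos hk2]
      rw [hstep, List.foldl_cons]
      congr 1
      rw [hsizeEq]
    · -- the window only shrinks at the right end
      have hWnext : (vals.drop (t + 1)).take m = (vals.drop (t + 1)).take (m - 1) := by
        have hlen3 : (vals.drop (t + 1)).length ≤ m - 1 := by
          rw [List.length_drop, hvalsdef, List.length_map]
          omega
        rw [List.take_of_length_le hlen3, List.take_of_length_le (by omega)]
      have hinv' : ∀ v : Int, (cnt.modify x 0 (· - 1)).getD v 0 =
          ((((vals.drop (t + 1)).take m).count v : Nat) : Int) := by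
        intro v
        rw [hWnext]
        exact hmod v
      have hrest : rest = M.drop (t + 1) := by
        have : M.drop (t + 1) = (M.drop t).drop 1 := by
          rw [List.drop_drop]
        rw [this, hsuf']
        rfl
      have hstep := ih (t + 1) (cnt.modify x 0 (· - 1))
        (if (if t + m ≤ k ∧
              ((pvTarget sub).keys.all (fun v => cnt.getD v 0 == (pvTarget sub).getD v 0) = true)
            then (M.getD (t + m - 1) (0, 0)).1 - p + 1
            else (arr.length : Int) - p) > best.2
          then (p, (if t + m ≤ k ∧
              ((pvTarget sub).keys.all (fun v => cnt.getD v 0 == (pvTarget sub).getD v 0) = true)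
            then (M.getD (t + m - 1) (0, 0)).1 - p + 1
            else (arr.length : Int) - p))
          else best)
        hrest hinv'
      simp only [pvLoop, if_neg hk2]
      rw [hstep, List.foldl_cons]
      congr 1
      rw [hsizeEq]

-- ===== VERDICT (by name: the statement is the Claim_ definition above) =====
theorem shortest_superseq_spec : Claim_equal_shortest_superseq := by
  intro arr subarray _
  unfold Spec_shortest_superseq
  simp only [shortest_superseq, shortest_superseq_alt]
  -- B's members list is the member list pvMemb
  have hmembers : (PySem.List.enumerate arr).filter (fun q => (pvTarget subarray).contains q.2)
      = pvMemb subarray arr 0 := by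
    unfold pvMemb
    apply List.filter_congr
    intro q _
    rw [show pvTarget subarray = PySem.Dict.counter subarray from
      PySem.Dict.foldl_insert_getD_add_one_eq_counter subarray]
    rw [PySem.Dict.contains_counter]
  rw [hmembers]
  -- A's dict of starts: a loop over fresh distinct keys, so items is a map
  rw [PySem.List.foldl_if_eq_foldl_filter (fun (q : Int × Int) => subarray.contains q.2)]
  have hfresh : ∀ q ∈ pvMemb subarray arr 0,
      (PySem.Dict.empty : PySem.Dict Int Int).contains q.1 = false := by
    intro q _; rfl
  have hnd : ((pvMemb subarray arr 0).map (fun q => q.1)).Nodup := by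
    rw [List.nodup_iff_pairwise_ne, List.pairwise_map]
    exact ((PySem.List.pairwise_lt_enumerate arr 0).filter _).imp ne_of_lt
  rw [show List.filter (fun q => subarray.contains q.2) (PySem.List.enumerate arr)
      = pvMemb subarray arr 0 from rfl]
  rw [PySem.Dict.items_foldl_insert_fresh (l := pvMemb subarray arr 0)
    (k := fun q => q.1)
    (v := fun q => size_subarray (PySem.List.slice arr (some q.1) none) subarray)
    (d := PySem.Dict.empty) hfresh hnd]
  have he : (PySem.Dict.empty : PySem.Dict Int Int).items = [] := rfl
  rw [he, List.nil_append, List.foldl_map]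
  -- B's initial counter counts the first window
  have hcnt0 : ∀ v : Int,
      ((PySem.List.slice (pvMemb subarray arr 0) none (some (subarray.length : Int))).foldl
        (fun d q => d.insert q.2 (d.getD q.2 0 + 1)) PySem.Dict.empty).getD v 0 =
      (((((pvMemb subarray arr 0).map Prod.snd).drop 0).take subarray.length).count v : Int) := by
    intro v
    rw [PySem.List.slice_to_natCast,
      ← List.foldl_map (f := Prod.snd)
        (g := fun (d : PySem.Dict Int Int) (x : Int) => d.insert x (d.getD x 0 + 1))
        (l := List.take subarray.length (pvMemb subarray arr 0)) (init := PySem.Dict.empty),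
      PySem.Dict.getD_foldl_insert_add_one, List.map_take, List.drop_zero,
      PySem.Dict.getD_empty, zero_add]
  rw [pv_loop_eq arr subarray (pvMemb subarray arr 0) 0 _ ((0 : Int), (0 : Int))
    List.drop_zero.symm hcnt0]
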